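-- pv_equiv track=rewrite | github.com/Taoge123/OptimizedLeetcode | LeetcodeNew/python2/LC_1708.py | largestSubarray
-- ===== SOURCE A (Python) =====
-- import collections
--
-- def largestSubarray(nums, k: int):
--
--     if k == 1:
--         return [max(nums)]
--     n = len(nums)
--     queue = collections.deque()
--
--     for i, val in enumerate(nums):
--         if n - i >= k:
--             while queue and val > queue[0]:
--                 queue.popleft()
--         if len(queue) < k:
--             queue.append(val)
--
--         elif len(queue) == k and queue and queue[1] > queue[0]:
--             queue.popleft()
--             queue.append(val)
--
--     return list(queue)
-- ===== SOURCE B (Python) =====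
-- def largestSubarray(nums, k: int):
--     if k == 1:
--         return [max(nums)]
--     n = len(nums)
--     if k > n:
--         return list(nums)
--     if k <= 0:
--         return []
--     idx = max(range(n - k + 1), key=lambda i: nums[i])
--     return nums[idx:idx + k]
-- ===== Notes on version B (the rewrite author's own statement) =====
-- stated objective: faster
-- what changed: Replaces A's per-element monotonic-deque sliding construction with a direct first-argmax over the feasible start positions followed by one slice nums[idx:idx+k] (same O(n) asymptotics, much less per-element work).
import Mathlib
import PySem

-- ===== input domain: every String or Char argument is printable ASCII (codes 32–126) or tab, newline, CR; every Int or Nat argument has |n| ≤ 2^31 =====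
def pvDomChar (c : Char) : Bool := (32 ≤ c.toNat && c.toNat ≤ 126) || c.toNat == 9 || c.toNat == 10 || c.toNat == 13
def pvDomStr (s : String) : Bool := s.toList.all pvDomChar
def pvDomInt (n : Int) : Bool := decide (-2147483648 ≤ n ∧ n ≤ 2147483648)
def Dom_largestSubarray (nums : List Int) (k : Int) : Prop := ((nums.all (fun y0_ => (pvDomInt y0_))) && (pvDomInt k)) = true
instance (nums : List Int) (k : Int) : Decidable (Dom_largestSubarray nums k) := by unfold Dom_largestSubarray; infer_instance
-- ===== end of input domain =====

-- B replaces A's monotonic-deque sliding construction by a first-argmax over the feasible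
-- start positions followed by one slice (objective: faster, by constant factor).

-- ===== PORT A =====
-- 'while queue and val > queue[0]: queue.popleft()'
def popFrontA (val : Int) : List Int → List Int
  | [] => []
  | q :: qs => if val > q then popFrontA val qs else q :: qs

-- body of A's 'for i, val in enumerate(nums)' loop (n, k fixed; queue is the deque)
def stepA (n k : Int) (queue : List Int) (iv : Int × Int) : List Int :=
  let q1 := if n - iv.1 ≥ k then popFrontA iv.2 queue else queue
  if (q1.length : Int) < k then q1 ++ [iv.2]
  else if (q1.length : Int) = k ∧ q1 ≠ [] ∧ q1.getD 1 0 > q1.getD 0 0 then q1.tail ++ [iv.2]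
  else q1

def largestSubarray (nums : List Int) (k : Int) : List Int :=
  if k = 1 then
    match PySem.List.max? nums (fun x => x) with
    | some m => [m]
    | none => []          -- Python raises ValueError here (max of empty); excluded by Pre_
  else
    (PySem.List.enumerate nums 0).foldl (stepA (nums.length : Int) k) []

-- ===== PORT B =====
-- one step of CPython's max(range(1, n-k+1), key=lambda i: nums[i]) loop, initial best = 0
def argmaxStepB (nums : List Int) (best i : Int) : Int :=
  if PySem.List.pyGetD nums i 0 > PySem.List.pyGetD nums best 0 then i else best

def largestSubarray_alt (nums : List Int) (k : Int) : List Int :=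
  if k = 1 then
    match PySem.List.max? nums (fun x => x) with
    | some m => [m]
    | none => []          -- Python raises ValueError here (max of empty); excluded by Pre_
  else
    let n : Int := (nums.length : Int)
    if k > n then nums
    else if k ≤ 0 then []
    else
      let idx := (PySem.List.pyRange 1 (n - k + 1) 1).foldl (argmaxStepB nums) 0
      PySem.List.slice nums (some idx) (some (idx + k))

-- ===== PRECONDITION & SPEC =====
-- Pre_ excludes only nums = [] with k = 1, where the Python A (and B alike) raises ValueError in max([]).
def Pre_largestSubarray (nums : List Int) (k : Int) : Prop := ¬ (k = 1 ∧ nums = [])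
instance (nums : List Int) (k : Int) : Decidable (Pre_largestSubarray nums k) := by unfold Pre_largestSubarray; infer_instance
def pvWitness_largestSubarray : List Int × Int := ([3, 1, 2], 2)

def Spec_largestSubarray (nums : List Int) (k : Int) (out : List Int) : Prop := out = largestSubarray_alt nums k
instance (nums : List Int) (k : Int) (out : List Int) : Decidable (Spec_largestSubarray nums k out) := by unfold Spec_largestSubarray; infer_instance

-- ===== CLAIM (what is proved, stated in full; the proofs are below) =====
def Claim_equal_largestSubarray : Prop := ∀ (nums : List Int) (k : Int), Dom_largestSubarray nums k → Pre_largestSubarray nums k → Spec_largestSubarray nums k (largestSubarray nums k)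

-- ===== LEMMAS AND PROOFS =====

-- value of the maximum of a nonempty list (junk 0 on [])
def vmaxR : List Int → Int
  | [] => 0
  | [x] => x
  | x :: y :: t => max x (vmaxR (y :: t))

-- index of the FIRST maximum of a nonempty list (junk 0 on [])
def fIdx : List Int → Nat
  | [] => 0
  | [_] => 0
  | x :: y :: t => if vmaxR (y :: t) ≤ x then 0 else fIdx (y :: t) + 1


lemma fIdx_lt : ∀ (l : List Int), l ≠ [] → fIdx l < l.length := by
  intro l
  induction l with
  | nil => simp
  | cons x t ih =>
    cases t with
    | nil => simp [fIdx]
    | cons y t' =>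
      intro _
      simp only [fIdx]
      split
      · simp
      · have := ih (by simp)
        simpa using Nat.succ_lt_succ this

lemma getD_fIdx : ∀ (l : List Int), l ≠ [] → l.getD (fIdx l) 0 = vmaxR l := by
  intro l
  induction l with
  | nil => simp
  | cons x t ih =>
    cases t with
    | nil => simp [fIdx, vmaxR]
    | cons y t' =>
      intro _
      simp only [fIdx, vmaxR]
      split
      · rename_i h; simp [List.getD]; omega
      · rename_i h
        have := ih (by simp)
        simpa [List.getD] using this.trans (by omega)

lemma le_vmaxR : ∀ (l : List Int), ∀ x ∈ l, x ≤ vmaxR l := by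
  intro l
  induction l with
  | nil => simp
  | cons x t ih =>
    cases t with
    | nil => simp [vmaxR]
    | cons y t' =>
      intro z hz
      simp only [vmaxR]
      rcases List.mem_cons.1 hz with h | h
      · omega
      · have := ih z h; omega

lemma vmaxR_append : ∀ (l : List Int), l ≠ [] → ∀ v, vmaxR (l ++ [v]) = max (vmaxR l) v := by
  intro l
  induction l with
  | nil => simp
  | cons x t ih =>
    cases t with
    | nil => intro _ v; simp [vmaxR]
    | cons y t' =>
      intro _ v
      have := ih (by simp) v
      simp only [List.cons_append] at this
      simp only [List.cons_append, vmaxR, this]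
      omega

lemma fIdx_append : ∀ (l : List Int), l ≠ [] → ∀ v,
    fIdx (l ++ [v]) = if vmaxR l < v then l.length else fIdx l := by
  intro l
  induction l with
  | nil => simp
  | cons x t ih =>
    cases t with
    | nil =>
      intro _ v
      simp only [List.cons_append, List.nil_append, fIdx, vmaxR]
      by_cases h : v ≤ x
      · rw [if_pos h, if_neg (by omega)]
      · rw [if_neg h, if_pos (by omega)]
        simp
    | cons y t' =>
      intro _ v
      have hv := vmaxR_append (y :: t') (by simp) v
      have hf := ih (by simp) v
      simp only [List.cons_append] at hv hf ⊢
      simp only [fIdx, vmaxR, hv, hf]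
      by_cases h1 : max (vmaxR (y :: t')) v ≤ x
      · rw [if_pos h1]
        by_cases h2 : max x (vmaxR (y :: t')) < v
        · omega
        · rw [if_neg h2, fIdx.eq_def]
          rw [if_pos (by omega)]
      · rw [if_neg h1]
        by_cases h2 : max x (vmaxR (y :: t')) < v
        · rw [if_pos h2, if_pos (by omega)]
          simp
        · rw [if_neg h2, if_neg (by omega), fIdx.eq_def]
          rw [if_neg (by omega)]

lemma take_pos_cons {α : Type} (m : Nat) (hm : 1 ≤ m) (x : α) (l : List α) :
    (x :: l).take m = x :: l.take (m - 1) := by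
  obtain ⟨m', rfl⟩ : ∃ m', m = m' + 1 := ⟨m - 1, by omega⟩
  simp [List.take_succ_cons]

lemma foldl_take_succ {α β : Type} (L : List α) (f : β → α → β) (b : β) (i : Nat) (h : i < L.length) :
    (L.take (i+1)).foldl f b = f ((L.take i).foldl f b) L[i] := by
  rw [List.take_add_one, List.getElem?_eq_getElem h]
  simp only [Option.toList_some, List.foldl_append, List.foldl_cons, List.foldl_nil]

lemma popFrontA_of_all_lt (v : Int) : ∀ (q : List Int), (∀ x ∈ q, x < v) → popFrontA v q = [] := by
  intro q
  induction q with
  | nil => intro _; rfl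
  | cons x t ih =>
    intro h
    simp only [popFrontA]
    rw [if_pos (h x (by simp))]
    exact ih (fun y hy => h y (by simp [hy]))

lemma popFrontA_of_head_le (v x : Int) (q : List Int) (h : v ≤ x) :
    popFrontA v (x :: q) = x :: q := by
  simp only [popFrontA]
  rw [if_neg (by omega)]

-- B's argmax fold computes the first argmax of the prefix of length c
lemma foldB_eq_fIdx (nums : List Int) : ∀ (c : Nat), 1 ≤ c → c ≤ nums.length →
    (PySem.List.pyRange 1 (c : Int) 1).foldl (argmaxStepB nums) 0 = ((fIdx (nums.take c) : Nat) : Int) := by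
  intro c
  induction c with
  | zero => intro h; omega
  | succ c ih =>
    intro _ hle
    by_cases hc0 : c = 0
    · subst hc0
      rw [PySem.List.pyRange_one_eq_nil (by norm_num)]
      have hne : nums ≠ [] := by intro h; rw [h] at hle; simp at hle
      obtain ⟨x, t, rfl⟩ := List.exists_cons_of_ne_nil hne
      simp [fIdx]
    · have h1c : 1 ≤ c := by omega
      have hcn : c < nums.length := by omega
      have hcast : ((c : Int) + 1) = ((c + 1 : Nat) : Int) := by push_cast; ring
      rw [← hcast, PySem.List.pyRange_one_succ_right (by omega), List.foldl_append,
        ih h1c (by omega)]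
      simp only [List.foldl_cons, List.foldl_nil, argmaxStepB]
      -- the candidate index c against the current best fIdx (take c)
      have hlen_take : (nums.take c).length = c := by simp; omega
      have htne : nums.take c ≠ [] := by
        intro h; rw [h] at hlen_take; simp at hlen_take; omega
      have hflt : fIdx (nums.take c) < c := by
        have := fIdx_lt _ htne; omega
      have hgc : PySem.List.pyGetD nums (c : Int) 0 = nums[c] := by
        rw [PySem.List.pyGetD_natCast]
        exact List.getD_eq_getElem nums 0 hcn
      have hgb : PySem.List.pyGetD nums ((fIdx (nums.take c) : Nat) : Int) 0 = vmaxR (nums.take c) := by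
        rw [PySem.List.pyGetD_natCast, List.getD_eq_getElem nums 0 (by omega)]
        have := getD_fIdx _ htne
        rw [List.getD_eq_getElem _ 0 (by omega)] at this
        rw [← this]
        exact (List.getElem_take).symm
      rw [hgc, hgb]
      have htk : nums.take (c + 1) = nums.take c ++ [nums[c]] := by
        rw [List.take_add_one, List.getElem?_eq_getElem hcn]; rfl
      rw [htk, fIdx_append _ htne]
      by_cases hbig : vmaxR (nums.take c) < nums[c]
      · rw [if_pos hbig, if_pos (by omega), hlen_take]
      · rw [if_neg hbig, if_neg (by omega)]

-- the A-side loop invariant: after i steps the deque is the window starting at the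
-- first argmax of the processed candidate prefix
lemma loopA_inv (nums : List Int) (kc : Nat) (h2 : 2 ≤ kc) (hkn : kc ≤ nums.length) :
    ∀ i : Nat, 1 ≤ i → i ≤ nums.length →
      ((PySem.List.enumerate nums 0).take i).foldl (stepA (nums.length : Int) (kc : Int)) []
        = (nums.drop (fIdx (nums.take (min i (nums.length - kc + 1))))).take
            (min (i - fIdx (nums.take (min i (nums.length - kc + 1)))) kc) := by
  intro i
  induction i with
  | zero => intro h; omega
  | succ i ih =>
    intro _ hle
    by_cases hi0 : i = 0
    · subst hi0
      obtain ⟨x, t, rfl⟩ := List.exists_cons_of_ne_nil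
        (show nums ≠ [] by intro h; rw [h] at hkn; simp at hkn; omega)
      have hin' : 0 < (PySem.List.enumerate (x :: t) 0).length := by
        rw [PySem.List.length_enumerate]; simp
      rw [foldl_take_succ _ _ _ 0 hin']
      have hmin : min 1 ((x :: t).length - kc + 1) = 1 := by simp
      rw [hmin]
      simp only [List.take_zero, List.foldl_nil, PySem.List.getElem_enumerate, stepA,
        popFrontA, ite_self, List.take_succ_cons, fIdx, List.drop_zero]
      rw [if_pos (by simp; omega)]
      have : min 1 kc = 1 := by omega
      rw [this]
      simp
    · have h1i : 1 ≤ i := by omega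
      have hin : i < nums.length := by omega
      have hin' : i < (PySem.List.enumerate nums 0).length := by
        rw [PySem.List.length_enumerate]; exact hin
      rw [foldl_take_succ _ _ _ i hin', ih h1i (by omega), PySem.List.getElem_enumerate]
      have hc'le : nums.length - kc + 1 ≤ nums.length := by omega
      have hc'1 : 1 ≤ nums.length - kc + 1 := by omega
      have hlen_take : (nums.take (min i (nums.length - kc + 1))).length = min i (nums.length - kc + 1) := by
        rw [List.length_take]; omega
      have hne : nums.take (min i (nums.length - kc + 1)) ≠ [] := by
        intro h; rw [h] at hlen_take; simp at hlen_take; omega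
      have halt : fIdx (nums.take (min i (nums.length - kc + 1))) < min i (nums.length - kc + 1) := by
        have := fIdx_lt _ hne; omega
      set a := fIdx (nums.take (min i (nums.length - kc + 1))) with ha
      have hai : a < i := by omega
      have hac : a < nums.length - kc + 1 := by omega
      have han : a < nums.length := by omega
      have hvm : nums[a] = vmaxR (nums.take (min i (nums.length - kc + 1))) := by
        have h1 := getD_fIdx _ hne
        rw [List.getD_eq_getElem _ 0 (by omega)] at h1
        rw [← h1]
        exact (List.getElem_take).symm
      set m := min (i - a) kc with hm
      have hm1 : 1 ≤ m := by omega
      have hman : a + m ≤ nums.length := by omega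
      have hqlen : ((nums.drop a).take m).length = m := by
        rw [List.length_take, List.length_drop]; omega
      have hdropa : nums.drop a = nums[a] :: nums.drop (a + 1) := List.drop_eq_getElem_cons han
      have hqcons : (nums.drop a).take m = nums[a] :: ((nums.drop (a + 1)).take (m - 1)) := by
        rw [hdropa, take_pos_cons m hm1]
      -- the appended element (drop a)[i-a] is nums[i]
      have hconti : (nums.drop a).take (i - a) ++ [nums[i]] = (nums.drop a).take (i - a + 1) := by
        rw [List.take_add_one, List.getElem?_eq_getElem (show i - a < (nums.drop a).length by
          rw [List.length_drop]; omega)]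
        rw [List.getElem_drop]
        simp only [show a + (i - a) = i from by omega]
        rfl
      by_cases hph : i + kc ≤ nums.length
      -- ===== phase 1: n - i ≥ k, the while loop may pop =====
      · have hmi : min i (nums.length - kc + 1) = i := by omega
        have hmi1 : min (i + 1) (nums.length - kc + 1) = i + 1 := by omega
        have htk : nums.take (i + 1) = nums.take i ++ [nums[i]] := by
          rw [List.take_add_one, List.getElem?_eq_getElem hin]; rfl
        have hnei : nums.take i ≠ [] := by rw [← hmi]; exact hne
        have hleni : (nums.take i).length = i := by rw [List.length_take]; omega
        have hfa : fIdx (nums.take (i + 1)) = if vmaxR (nums.take i) < nums[i] then i else a := by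
          rw [htk, fIdx_append _ hnei, hleni, ha, hmi]
        rw [hmi1, hfa]
        by_cases hbig : vmaxR (nums.take i) < nums[i]
        · -- new maximum: the whole deque is popped
          have hall : ∀ x ∈ (nums.drop a).take m, x < nums[i] := by
            intro x hx
            have hmle : m ≤ i - a := by omega
            have hx2 : x ∈ (nums.drop a).take (i - a) := by
              have : (nums.drop a).take m = ((nums.drop a).take (i - a)).take m := by
                rw [List.take_take]; congr 1; omega
              rw [this] at hx
              exact List.mem_of_mem_take hx
            have hx3 : x ∈ nums.take i := by
              rw [show i = a + (i - a) by omega, List.take_add]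
              exact List.mem_append_right _ hx2
            have := le_vmaxR _ x hx3
            omega
          simp only [stepA]
          rw [if_pos (show (nums.length : Int) - (0 + (i : Int)) ≥ (kc : Int) by omega)]
          rw [popFrontA_of_all_lt _ _ hall]
          rw [if_pos (by simp; omega)]
          rw [if_pos hbig]
          have h1 : min (i + 1 - i) kc = 1 := by omega
          rw [h1, List.drop_eq_getElem_cons hin, take_pos_cons 1 (by omega)]
          simp
        · -- current front stays maximal: nothing is popped
          have hile : nums[i] ≤ nums[a] := by rw [hvm, hmi]; omega
          have hpop : popFrontA nums[i] ((nums.drop a).take m) = (nums.drop a).take m := by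
            rw [hqcons]
            exact popFrontA_of_head_le _ _ _ hile
          simp only [stepA]
          rw [if_pos (show (nums.length : Int) - (0 + (i : Int)) ≥ (kc : Int) by omega)]
          rw [hpop, hqlen, if_neg hbig]
          by_cases hmk : m < kc
          · have hmeq : m = i - a := by omega
            rw [if_pos (by omega), hmeq, hconti]
            congr 1
            omega
          · have hmeq : m = kc := by omega
            have hfullk : a + kc ≤ i := by omega
            have ha1 : a + 1 < min i (nums.length - kc + 1) := by omega
            have hA1n : a + 1 < nums.length := by omega
            have hkey : nums[a + 1] ≤ nums[a] := by
              have hmem : nums[a + 1] ∈ nums.take (min i (nums.length - kc + 1)) := by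
                have hb : a + 1 < (nums.take (min i (nums.length - kc + 1))).length := by omega
                have : (nums.take (min i (nums.length - kc + 1)))[a + 1] = nums[a + 1] :=
                  List.getElem_take
                rw [← this]
                exact List.getElem_mem hb
              have := le_vmaxR _ _ hmem
              omega
            have hgd0 : ((nums.drop a).take m).getD 0 0 = nums[a] := by rw [hqcons]; simp
            have hgd1 : ((nums.drop a).take m).getD 1 0 = nums[a + 1] := by
              rw [hqcons, List.drop_eq_getElem_cons hA1n, take_pos_cons (m - 1) (by omega)]
              simp [List.getD]
            rw [if_neg (by omega)]
            rw [if_neg (by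
              rintro ⟨-, -, hgt⟩
              rw [hgd0, hgd1] at hgt
              omega)]
            congr 1
            omega
      -- ===== phase 2: n - i < k, no popping =====
      · have hmi : min i (nums.length - kc + 1) = nums.length - kc + 1 := by omega
        have hmi1 : min (i + 1) (nums.length - kc + 1) = nums.length - kc + 1 := by omega
        rw [hmi1, ← hmi, ← ha]
        simp only [stepA]
        rw [if_neg (show ¬ ((nums.length : Int) - (0 + (i : Int)) ≥ (kc : Int)) by omega)]
        rw [hqlen]
        by_cases hmk : m < kc
        · have hmeq : m = i - a := by omega
          rw [if_pos (by omega), hmeq, hconti]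
          congr 1
          omega
        · have hmeq : m = kc := by omega
          have hfullk : a + kc ≤ i := by omega
          have ha1 : a + 1 < min i (nums.length - kc + 1) := by omega
          have hA1n : a + 1 < nums.length := by omega
          have hkey : nums[a + 1] ≤ nums[a] := by
            have hmem : nums[a + 1] ∈ nums.take (min i (nums.length - kc + 1)) := by
              have hb : a + 1 < (nums.take (min i (nums.length - kc + 1))).length := by omega
              have : (nums.take (min i (nums.length - kc + 1)))[a + 1] = nums[a + 1] :=
                List.getElem_take
              rw [← this]
              exact List.getElem_mem hb
            have := le_vmaxR _ _ hmem
            omega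
          have hgd0 : ((nums.drop a).take m).getD 0 0 = nums[a] := by rw [hqcons]; simp
          have hgd1 : ((nums.drop a).take m).getD 1 0 = nums[a + 1] := by
            rw [hqcons, List.drop_eq_getElem_cons hA1n, take_pos_cons (m - 1) (by omega)]
            simp [List.getD]
          rw [if_neg (by omega)]
          rw [if_neg (by
            rintro ⟨-, -, hgt⟩
            rw [hgd0, hgd1] at hgt
            omega)]
          congr 1
          omega

lemma stepA_nonpos (n k : Int) (hk : k ≤ 0) (p : Int × Int) : stepA n k [] p = [] := by
  have hq : (if n - p.1 ≥ k then popFrontA p.2 [] else []) = [] := by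
    split <;> rfl
  simp only [stepA, hq]
  rw [if_neg (by simp only [List.length_nil, Nat.cast_zero]; omega)]
  split
  · rename_i h
    simp at h
  · rfl

lemma foldA_nonpos (n k : Int) (hk : k ≤ 0) : ∀ (L : List (Int × Int)), L.foldl (stepA n k) [] = [] := by
  intro L
  induction L with
  | nil => rfl
  | cons p t ih => rw [List.foldl_cons, stepA_nonpos n k hk p]; exact ih

lemma foldA_big (nums : List Int) (k : Int) (hk : (nums.length : Int) < k) :
    ∀ i : Nat, i ≤ nums.length →
      ((PySem.List.enumerate nums 0).take i).foldl (stepA (nums.length : Int) k) [] = nums.take i := by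
  intro i
  induction i with
  | zero => intro _; simp
  | succ i ih =>
    intro hle
    have hin : i < nums.length := by omega
    have hin' : i < (PySem.List.enumerate nums 0).length := by
      rw [PySem.List.length_enumerate]; exact hin
    rw [foldl_take_succ _ _ _ i hin', ih (by omega), PySem.List.getElem_enumerate]
    have hlen : (nums.take i).length = i := by simp; omega
    have hq : (if (nums.length : Int) - (0 + (i : Int)) ≥ k then popFrontA nums[i] (nums.take i) else nums.take i) = nums.take i := by
      rw [if_neg (by omega)]
    simp only [stepA, hq, hlen]
    rw [if_pos (by omega)]
    rw [List.take_add_one, List.getElem?_eq_getElem hin]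
    rfl

-- ===== VERDICT (by name: the statement is the Claim_ definition above) =====
theorem largestSubarray_spec : Claim_equal_largestSubarray := by
  unfold Claim_equal_largestSubarray
  intro nums k _hdom hpre
  unfold Pre_largestSubarray at hpre
  unfold Spec_largestSubarray
  have hLen : (PySem.List.enumerate nums 0).length = nums.length := PySem.List.length_enumerate nums 0
  by_cases hk1 : k = 1
  · simp [largestSubarray, largestSubarray_alt, hk1]
  · by_cases hk0 : k ≤ 0
    · have hA : largestSubarray nums k = [] := by
        simp only [largestSubarray]
        rw [if_neg hk1]
        exact foldA_nonpos _ _ hk0 _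
      have hB : largestSubarray_alt nums k = [] := by
        simp only [largestSubarray_alt]
        rw [if_neg hk1, if_neg (by omega), if_pos hk0]
      rw [hA, hB]
    · by_cases hkn : (nums.length : Int) < k
      · have h2 := foldA_big nums k hkn nums.length le_rfl
        have e1 : (PySem.List.enumerate nums 0).take nums.length = PySem.List.enumerate nums 0 :=
          List.take_of_length_le (by rw [hLen])
        rw [e1, List.take_length] at h2
        have hA : largestSubarray nums k = nums := by
          simp only [largestSubarray]
          rw [if_neg hk1]
          exact h2
        have hB : largestSubarray_alt nums k = nums := by
          simp only [largestSubarray_alt]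
          rw [if_neg hk1, if_pos (by omega)]
        rw [hA, hB]
      · -- main case: 2 ≤ k ≤ len nums
        have hk2 : 2 ≤ k := by omega
        set kc := k.toNat with hkc
        have hkck : (kc : Int) = k := Int.toNat_of_nonneg (by omega)
        have h2 : 2 ≤ kc := by omega
        have hknn : kc ≤ nums.length := by omega
        have hA := loopA_inv nums kc h2 hknn nums.length (by omega) le_rfl
        have e1 : (PySem.List.enumerate nums 0).take nums.length = PySem.List.enumerate nums 0 :=
          List.take_of_length_le (by rw [hLen])
        rw [e1] at hA
        have hmin : min nums.length (nums.length - kc + 1) = nums.length - kc + 1 := by omega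
        rw [hmin] at hA
        have hlen_take : (nums.take (nums.length - kc + 1)).length = nums.length - kc + 1 := by
          rw [List.length_take]; omega
        have hne : nums.take (nums.length - kc + 1) ≠ [] := by
          intro h; rw [h] at hlen_take; simp at hlen_take
        have halt : fIdx (nums.take (nums.length - kc + 1)) < nums.length - kc + 1 := by
          have := fIdx_lt _ hne; omega
        have hminf : min (nums.length - fIdx (nums.take (nums.length - kc + 1))) kc = kc := by omega
        rw [hminf] at hA
        have hB := foldB_eq_fIdx nums (nums.length - kc + 1) (by omega) (by omega)
        have hAval : largestSubarray nums k = (nums.drop (fIdx (nums.take (nums.length - kc + 1)))).take kc := by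
          simp only [largestSubarray]
          rw [if_neg hk1, ← hkck]
          exact hA
        rw [hAval]
        simp only [largestSubarray_alt]
        rw [if_neg hk1, if_neg (by omega), if_neg (by omega)]
        rw [show (nums.length : Int) - k + 1 = ((nums.length - kc + 1 : Nat) : Int) by omega]
        rw [hB, ← hkck, PySem.List.slice_natCast_add]
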